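-- pv_equiv track=rewrite | github.com/sir-celestin/Python-projects | calendar_month.py | week
-- ===== SOURCE A (Python) =====
-- def week(week_num, start_day, days_in_month):
--     # Your code here
--     string=""
--     if week_num==1:
--         string+="   "*(start_day-1) #ensures date starts in correct column
--
--         for i in range (start_day,8):
--             date_num = i - start_day+1  #calculates the date
--             string+=" "+str(date_num)+" "
--     else:
--         for i in range (7):
--             date_num=(week_num-1)*7+i+2-start_day #calculates the date
--             if date_num>days_in_month: # stops program after the last day of the month
--                 return string
--             elif date_num<10:   #ensures alignment when num<10 by adding a space
--                 string+=" "+str(date_num)+" "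
--             else:
--                 string+=str(date_num)+" "
--     return string
-- ===== SOURCE B (Python) =====
-- def week(week_num, start_day, days_in_month):
--     if week_num == 1:
--         dates = range(1, 9 - start_day)
--         row = (" " + "  ".join(str(d) for d in dates) + " ") if dates else ""
--         return "   " * (start_day - 1) + row
--     def cells(d, k):
--         # cells for the remaining k columns, starting at date d, built back-to-front
--         if k == 0 or d > days_in_month:
--             return ""
--         pad = " " if d < 10 else ""
--         return pad + str(d) + " " + cells(d + 1, k - 1)
--     return cells((week_num - 1) * 7 + 2 - start_day, 7)
-- ===== Notes on version B (the rewrite author's own statement) =====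
-- stated objective: alternative
-- what changed: Week 1 is built by joining the date strings with a two-space separator instead of A's accumulator loop over column indices, and the general week is a back-to-front recursion that carries the date itself with a countdown (termination by base cases) instead of A's index loop with an early return inside the loop body.
import Mathlib
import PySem

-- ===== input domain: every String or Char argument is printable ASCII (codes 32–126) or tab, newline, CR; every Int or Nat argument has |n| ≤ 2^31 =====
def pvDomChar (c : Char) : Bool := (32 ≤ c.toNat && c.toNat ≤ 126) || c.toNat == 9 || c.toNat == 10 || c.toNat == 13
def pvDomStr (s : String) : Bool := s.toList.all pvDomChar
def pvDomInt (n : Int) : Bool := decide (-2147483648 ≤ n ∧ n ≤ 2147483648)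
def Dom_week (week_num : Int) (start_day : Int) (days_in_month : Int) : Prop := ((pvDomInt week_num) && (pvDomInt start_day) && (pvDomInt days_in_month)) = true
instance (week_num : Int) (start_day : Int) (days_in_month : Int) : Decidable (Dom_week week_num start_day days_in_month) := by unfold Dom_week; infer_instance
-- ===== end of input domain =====

-- B rebuilds the week differently: week 1 by joining the date strings with a two-space
-- separator, the general week by a back-to-front recursion carrying the date and a countdown
-- (objective: alternative decomposition, same cost).

-- ===== PORT A =====
-- the 'else' loop of A: for i in range(7) with an early 'return string' when the date passes days_in_month
def weekLoopA (week_num : Int) (start_day : Int) (days_in_month : Int) : List Int → List Char → List Char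
  | [], s => s
  | i :: rest, s =>
    let date_num := (week_num - 1) * 7 + i + 2 - start_day
    if date_num > days_in_month then s
    else if date_num < 10 then
      weekLoopA week_num start_day days_in_month rest (s ++ (' ' :: PySem.Int.toChars date_num ++ [' ']))
    else
      weekLoopA week_num start_day days_in_month rest (s ++ (PySem.Int.toChars date_num ++ [' ']))

def week (week_num : Int) (start_day : Int) (days_in_month : Int) : String :=
  if week_num == 1 then
    -- string += "   "*(start_day-1); then for i in range(start_day, 8): string += " "+str(i-start_day+1)+" "
    let s0 : List Char := PySem.List.pyRepeat "   ".toList (start_day - 1)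
    String.ofList ((PySem.List.pyRange start_day 8 1).foldl
      (fun s i => s ++ (' ' :: PySem.Int.toChars (i - start_day + 1) ++ [' '])) s0)
  else
    String.ofList (weekLoopA week_num start_day days_in_month (PySem.List.pyRange 0 7 1) [])

-- ===== PORT B =====
-- def cells(d, k): "" if k == 0 or d > days_in_month else pad + str(d) + " " + cells(d+1, k-1)
def cellsB (days_in_month : Int) : Int → Nat → List Char
  | _, 0 => []
  | d, k + 1 =>
    if d > days_in_month then []
    else (if d < 10 then [' '] else []) ++ PySem.Int.toChars d ++ [' '] ++ cellsB days_in_month (d + 1) k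

def week_alt (week_num : Int) (start_day : Int) (days_in_month : Int) : String :=
  if week_num == 1 then
    let dates := PySem.List.pyRange 1 (9 - start_day) 1
    let row : List Char :=
      if dates ≠ [] then
        ' ' :: PySem.Chars.join [' ', ' '] (dates.map PySem.Int.toChars) ++ [' ']
      else []
    String.ofList (PySem.List.pyRepeat "   ".toList (start_day - 1) ++ row)
  else
    String.ofList (cellsB days_in_month ((week_num - 1) * 7 + 2 - start_day) 7)

-- ===== PRECONDITION & SPEC =====
def Spec_week (week_num : Int) (start_day : Int) (days_in_month : Int) (out : String) : Prop := out = week_alt week_num start_day days_in_month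
instance (week_num : Int) (start_day : Int) (days_in_month : Int) (out : String) : Decidable (Spec_week week_num start_day days_in_month out) := by unfold Spec_week; infer_instance

-- ===== CLAIM =====
def Claim_equal_week : Prop := ∀ (week_num : Int) (start_day : Int) (days_in_month : Int), Dom_week week_num start_day days_in_month → Spec_week week_num start_day days_in_month (week week_num start_day days_in_month)

-- ===== LEMMAS AND PROOFS =====

-- flattening " d "-cells equals wrapping the "  "-join (nonempty case)
theorem cells_eq_join (f : Int → List Char) :
    ∀ (l : List Int), l ≠ [] →
      (l.map (fun d => ' ' :: f d ++ [' '])).flatten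
        = ' ' :: PySem.Chars.join [' ', ' '] (l.map f) ++ [' '] := by
  intro l
  induction l with
  | nil => intro h; exact absurd rfl h
  | cons a t ih =>
    intro _
    cases t with
    | nil =>
      simp only [List.map_cons, List.map_nil, List.flatten_cons, List.flatten_nil,
        PySem.Chars.join_singleton, List.append_nil]
    | cons b t' =>
      rw [List.map_cons, List.flatten_cons, ih (by simp)]
      simp only [List.map_cons]
      rw [PySem.Chars.join_cons_cons]
      simp only [List.cons_append, List.nil_append, List.append_assoc]

theorem foldl_append_flatten {α : Type} (g : α → List Char) :
    ∀ (l : List α) (s : List Char), l.foldl (fun s i => s ++ g i) s = s ++ (l.map g).flatten := by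
  intro l
  induction l with
  | nil => intro s; rw [List.foldl_nil, List.map_nil, List.flatten_nil, List.append_nil]
  | cons a t ih =>
    intro s
    rw [List.foldl_cons, ih, List.map_cons, List.flatten_cons, List.append_assoc]

theorem week1_maps_eq (sd : Int) :
    (PySem.List.pyRange sd 8 1).map (fun i => ' ' :: PySem.Int.toChars (i - sd + 1) ++ [' '])
      = (PySem.List.pyRange 1 (9 - sd) 1).map
          (fun d => ' ' :: PySem.Int.toChars d ++ [' ']) := by
  rw [PySem.List.pyRange_one, PySem.List.pyRange_one, List.map_map, List.map_map]
  rw [show (9 - sd - 1).toNat = (8 - sd).toNat from by omega]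
  apply List.map_congr_left
  intro k _
  show ' ' :: PySem.Int.toChars (sd + (k : Int) - sd + 1) ++ [' ']
      = ' ' :: PySem.Int.toChars (1 + (k : Int)) ++ [' ']
  rw [show sd + (k : Int) - sd + 1 = 1 + (k : Int) from by omega]

theorem week1_flatten (sd : Int) (s0 : List Char) :
    (PySem.List.pyRange sd 8 1).foldl
      (fun s i => s ++ (' ' :: PySem.Int.toChars (i - sd + 1) ++ [' '])) s0
    = s0 ++ ((PySem.List.pyRange 1 (9 - sd) 1).map
        (fun d => ' ' :: PySem.Int.toChars d ++ [' '])).flatten := by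
  refine (foldl_append_flatten
    (fun i => ' ' :: PySem.Int.toChars (i - sd + 1) ++ [' '])
    (PySem.List.pyRange sd 8 1) s0).trans ?_
  rw [week1_maps_eq sd]

theorem loopA_eq_cellsB (wn sd dim f : Int) (hf : f = (wn - 1) * 7 + 2 - sd) :
    ∀ (n : Nat) (i : Int), i + n = 7 → ∀ (acc : List Char),
    weekLoopA wn sd dim (PySem.List.pyRange i 7 1) acc = acc ++ cellsB dim (f + i) n := by
  intro n
  induction n with
  | zero =>
    intro i hi acc
    rw [PySem.List.pyRange_one_eq_nil (by omega)]
    show acc = acc ++ cellsB dim (f + i) 0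
    rw [show cellsB dim (f + i) 0 = [] from rfl, List.append_nil]
  | succ n ih =>
    intro i hi acc
    rw [PySem.List.pyRange_one_cons (by omega)]
    show (if (wn - 1) * 7 + i + 2 - sd > dim then acc
          else if (wn - 1) * 7 + i + 2 - sd < 10 then
            weekLoopA wn sd dim (PySem.List.pyRange (i + 1) 7 1)
              (acc ++ (' ' :: PySem.Int.toChars ((wn - 1) * 7 + i + 2 - sd) ++ [' ']))
          else
            weekLoopA wn sd dim (PySem.List.pyRange (i + 1) 7 1)
              (acc ++ (PySem.Int.toChars ((wn - 1) * 7 + i + 2 - sd) ++ [' '])))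
        = acc ++ cellsB dim (f + i) (n + 1)
    rw [show (wn - 1) * 7 + i + 2 - sd = f + i from by omega]
    have hcells : cellsB dim (f + i) (n + 1)
        = if f + i > dim then []
          else (if f + i < 10 then [' '] else []) ++ PySem.Int.toChars (f + i) ++ [' ']
            ++ cellsB dim (f + i + 1) n := rfl
    by_cases h1 : f + i > dim
    · rw [if_pos h1, hcells, if_pos h1, List.append_nil]
    · rw [if_neg h1, hcells, if_neg h1]
      by_cases h2 : f + i < 10
      · rw [if_pos h2, if_pos h2, ih (i + 1) (by omega),
          show f + i + 1 = f + (i + 1) from by ring]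
        rw [List.cons_append, ← List.append_assoc]
        rfl
      · rw [if_neg h2, if_neg h2, ih (i + 1) (by omega),
          show f + i + 1 = f + (i + 1) from by ring]
        simp only [List.nil_append, List.append_assoc]

theorem week_eq_alt (wn sd dim : Int) : week wn sd dim = week_alt wn sd dim := by
  unfold week week_alt
  by_cases h : wn = 1
  · rw [if_pos (by exact beq_iff_eq.mpr h)]
    rw [if_pos (by exact beq_iff_eq.mpr h)]
    apply congrArg String.ofList
    rw [week1_flatten sd _]
    by_cases hd : PySem.List.pyRange 1 (9 - sd) 1 = []
    · rw [if_neg (by simpa using hd), hd]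
      rfl
    · rw [if_pos (by simpa using hd), cells_eq_join PySem.Int.toChars _ hd]
  · rw [if_neg (by simpa using h), if_neg (by simpa using h)]
    apply congrArg String.ofList
    have := loopA_eq_cellsB wn sd dim ((wn - 1) * 7 + 2 - sd) rfl 7 0 (by omega) []
    rw [this, List.nil_append, Int.add_zero]

-- ===== VERDICT =====
theorem week_spec : Claim_equal_week := by
  intro wn sd dim _
  unfold Spec_week
  exact week_eq_alt wn sd dim
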